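-- pv_equiv track=rewrite | github.com/luisfpatrocinio/beecrowd | bee1240.py | encaixa
-- ===== SOURCE A (Python) =====
-- def encaixa(a: int, b: int):
--     if b > a:
--         return False
--
--     while b > 0:
--         # Compara o último dígito de A com o de B
--         if a % 10 != b % 10:
--             return False
--
--         # Retira o último dígito
--         a = a // 10
--         b = b // 10
--
--     # Se chegou até aqui é porque tá tudo certo
--     return True
-- ===== SOURCE B (Python) =====
-- def encaixa(a: int, b: int):
--     if b > a:
--         return False
--     if b <= 0:
--         # the digit loop of the task never runs for b <= 0, so b <= a alone decides
--         return True
--     # b is a digit-suffix of a iff a's last len(str(b)) digits equal b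
--     return a % 10 ** len(str(b)) == b
-- ===== Notes on version B (the rewrite author's own statement) =====
-- stated objective: simpler
-- what changed: Replaces the digit-by-digit while loop with a single closed-form modulus check: a % 10**len(str(b)) == b (with the trivial b<=0 case answered directly), so B does one arithmetic comparison instead of iterating over the digits of b.
import Mathlib
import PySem

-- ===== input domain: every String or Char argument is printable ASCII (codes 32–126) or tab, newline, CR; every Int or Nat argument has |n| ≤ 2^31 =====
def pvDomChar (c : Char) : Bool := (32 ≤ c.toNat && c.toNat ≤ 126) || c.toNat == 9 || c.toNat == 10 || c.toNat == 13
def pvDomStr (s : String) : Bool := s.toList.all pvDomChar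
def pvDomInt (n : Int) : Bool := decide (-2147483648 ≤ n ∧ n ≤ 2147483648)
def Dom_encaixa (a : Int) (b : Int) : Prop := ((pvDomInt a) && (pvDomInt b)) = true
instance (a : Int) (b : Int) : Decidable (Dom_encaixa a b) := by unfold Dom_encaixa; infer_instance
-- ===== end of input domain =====

-- B replaces A's digit-by-digit comparison loop with one closed-form modulus check (simpler).

-- ===== PORT A =====
-- the 'while b > 0' loop of A, state (a, b); terminates because b // 10 < b for b > 0
def encaixaLoop (a : Int) (b : Int) : Bool :=
  if _h : 0 < b then
    if PySem.Int.mod a 10 ≠ PySem.Int.mod b 10 then false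
    else encaixaLoop (PySem.Int.floordiv a 10) (PySem.Int.floordiv b 10)
  else true
termination_by b.toNat
decreasing_by
  have : PySem.Int.floordiv b 10 = b / 10 := PySem.Int.floordiv_eq_ediv_of_pos (by norm_num)
  rw [this]; omega

def encaixa (a : Int) (b : Int) : Bool :=
  if b > a then false else encaixaLoop a b

-- ===== PORT B =====
-- literal port of Source B; '10 ** len(str(b))' is '10 ^ (PySem.Str.len (PySem.Int.toStr b)).toNat'
-- (.toNat only converts the nonnegative Python length to Lean's exponent type)
def encaixa_alt (a : Int) (b : Int) : Bool :=
  if b > a then false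
  else if b ≤ 0 then true
  else decide (PySem.Int.mod a (10 ^ (PySem.Str.len (PySem.Int.toStr b)).toNat) = b)

-- ===== PRECONDITION & SPEC =====
def Spec_encaixa (a : Int) (b : Int) (out : Bool) : Prop := out = encaixa_alt a b
instance (a : Int) (b : Int) (out : Bool) : Decidable (Spec_encaixa a b out) := by unfold Spec_encaixa; infer_instance

-- ===== CLAIM (what is proved, stated in full; the proofs are below) =====
def Claim_equal_encaixa : Prop := ∀ (a : Int) (b : Int), Dom_encaixa a b → Spec_encaixa a b (encaixa a b)

-- ===== LEMMAS AND PROOFS =====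

-- Nat.toDigitsCore is fuel-invariant as long as the fuel exceeds n
lemma toDigitsCore_fuel : ∀ (n f₁ f₂ : Nat) (acc : List Char), n < f₁ → n < f₂ →
    Nat.toDigitsCore 10 f₁ n acc = Nat.toDigitsCore 10 f₂ n acc := by
  intro n
  induction n using Nat.strong_induction_on with
  | _ n ih =>
    intro f₁ f₂ acc h₁ h₂
    match f₁, f₂ with
    | g₁ + 1, g₂ + 1 =>
      simp only [Nat.toDigitsCore]
      by_cases hz : n / 10 = 0
      · simp [hz]
      · simp only [hz]
        exact ih (n / 10) (by omega) g₁ g₂ _ (by omega) (by omega)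

-- the decimal length of n peels one digit per division by 10
lemma toDigits_len_step (n : Nat) (hn : 10 ≤ n) :
    (Nat.toDigits 10 n).length = (Nat.toDigits 10 (n / 10)).length + 1 := by
  have hz : n / 10 ≠ 0 := by omega
  have h1 : Nat.toDigits 10 n = Nat.toDigitsCore 10 n (n / 10) [(n % 10).digitChar] := by
    simp only [Nat.toDigits, Nat.toDigitsCore]
    simp [hz]
  rw [h1, Nat.toDigitsCore_lens_eq]
  have h2 : Nat.toDigitsCore 10 n (n / 10) [] = Nat.toDigits 10 (n / 10) := by
    exact toDigitsCore_fuel (n / 10) n (n / 10 + 1) [] (by omega) (by omega)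
  rw [h2]

lemma toDigits_len_small (n : Nat) (hn : n < 10) : (Nat.toDigits 10 n).length = 1 := by
  have hz : n / 10 = 0 := by omega
  simp [Nat.toDigits, Nat.toDigitsCore, hz]

lemma toChars_len_pos_step (b : Int) (hb : 10 ≤ b) :
    (PySem.Int.toChars b).length = (PySem.Int.toChars (b / 10)).length + 1 := by
  have h1 : ¬ b < 0 := by omega
  have h2 : ¬ b / 10 < 0 := by omega
  simp only [PySem.Int.toChars, if_neg h1, if_neg h2]
  have h3 : b.toNat / 10 = (b / 10).toNat := by omega
  rw [← h3]
  exact toDigits_len_step b.toNat (by omega)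

lemma toChars_len_small (b : Int) (h0 : 0 < b) (hb : b < 10) :
    (PySem.Int.toChars b).length = 1 := by
  have h1 : ¬ b < 0 := by omega
  simp only [PySem.Int.toChars, if_neg h1]
  exact toDigits_len_small b.toNat (by omega)

-- splitting a positive-modulus remainder into last digit and the rest
lemma emod_pow_succ (a : Int) (m : Int) (hm : 0 < m) :
    a % (10 * m) = 10 * ((a / 10) % m) + a % 10 := by
  have e1 : a = 10 * (a / 10) + a % 10 := by omega
  have e2 : a / 10 = m * ((a / 10) / m) + (a / 10) % m := (Int.ediv_add_emod (a / 10) m).symm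
  have hr1 : 0 ≤ a % 10 := Int.emod_nonneg _ (by norm_num)
  have hr1' : a % 10 < 10 := Int.emod_lt_of_pos _ (by norm_num)
  have hr2 : 0 ≤ (a / 10) % m := Int.emod_nonneg _ (by omega)
  have hr2' : (a / 10) % m < m := Int.emod_lt_of_pos _ hm
  have key : a = (10 * ((a / 10) % m) + a % 10) + (10 * m) * ((a / 10) / m) := by
    linear_combination e1 + 10 * e2
  conv_lhs => rw [key]
  rw [Int.add_mul_emod_self_left]
  exact Int.emod_eq_of_lt (by omega) (by omega)

-- A's loop computes the closed-form suffix test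
lemma encaixaLoop_eq : ∀ (n : Nat) (b : Int), b.toNat = n → 0 < b → ∀ (a : Int),
    encaixaLoop a b = decide (PySem.Int.mod a (10 ^ (PySem.Int.toChars b).length) = b) := by
  intro n
  induction n using Nat.strong_induction_on with
  | _ n ih =>
    intro b hn hb a
    rw [encaixaLoop]
    simp only [dif_pos hb]
    rw [PySem.Int.mod_eq_emod_of_pos (a := a) (b := 10) (by norm_num),
        PySem.Int.mod_eq_emod_of_pos (a := b) (b := 10) (by norm_num),
        PySem.Int.floordiv_eq_ediv_of_pos (a := a) (b := 10) (by norm_num),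
        PySem.Int.floordiv_eq_ediv_of_pos (a := b) (b := 10) (by norm_num),
        PySem.Int.mod_eq_emod_of_pos (a := a) (b := 10 ^ (PySem.Int.toChars b).length) (by positivity)]
    by_cases hsmall : b < 10
    · -- one-digit b : the recursive call sees b / 10 = 0 and returns true
      have hz : b / 10 = 0 := by omega
      have hlen : (PySem.Int.toChars b).length = 1 := toChars_len_small b hb hsmall
      have htail : encaixaLoop (a / 10) (b / 10) = true := by
        rw [hz, encaixaLoop]; simp
      rw [htail, hlen, pow_one]
      by_cases hd : a % 10 = b % 10
      · have h2 : a % 10 = b := by omega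
        have h3 : b % 10 = b := by omega
        rw [hd, h3]
        simp
      · have h2 : ¬ (a % 10 = b) := by omega
        simp [hd, h2]
    · -- multi-digit b : peel the last digit and use the induction hypothesis at b / 10
      have hb' : (0:Int) < b / 10 := by omega
      have hlen := toChars_len_pos_step b (by omega)
      have hIH := ih (b / 10).toNat (by omega) (b / 10) rfl hb' (a / 10)
      rw [PySem.Int.mod_eq_emod_of_pos (a := a / 10)
            (b := 10 ^ (PySem.Int.toChars (b / 10)).length) (by positivity)] at hIH
      rw [hIH, hlen]
      have hm : (0:Int) < 10 ^ (PySem.Int.toChars (b / 10)).length := by positivity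
      have hsplit := emod_pow_succ a (10 ^ (PySem.Int.toChars (b / 10)).length) hm
      have hr2 : 0 ≤ (a / 10) % 10 ^ (PySem.Int.toChars (b / 10)).length := Int.emod_nonneg _ (by omega)
      by_cases hd : a % 10 = b % 10
      · simp only [hd, ne_eq, not_true_eq_false, if_false]
        have hiff : ((a / 10) % 10 ^ (PySem.Int.toChars (b / 10)).length = b / 10) ↔
            (a % 10 ^ ((PySem.Int.toChars (b / 10)).length + 1) = b) := by
          rw [pow_succ, mul_comm, hsplit]
          omega
        simp [hiff]
      · have : ¬ (a % 10 ^ ((PySem.Int.toChars (b / 10)).length + 1) = b) := by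
          rw [pow_succ, mul_comm, hsplit]
          omega
        simp [hd, this]

-- ===== VERDICT (by name: the statement is the Claim_ definition above) =====
theorem encaixa_spec : Claim_equal_encaixa := by
  intro a b _
  unfold Spec_encaixa encaixa encaixa_alt
  by_cases hba : b > a
  · simp [hba]
  · simp only [hba, if_false]
    by_cases hb0 : b ≤ 0
    · have : ¬ (0 < b) := by omega
      rw [encaixaLoop]
      simp [this, hb0]
    · have hb : 0 < b := by omega
      rw [encaixaLoop_eq b.toNat b rfl hb a]
      have hlen : (PySem.Str.len (PySem.Int.toStr b)).toNat = (PySem.Int.toChars b).length := by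
        rw [PySem.Str.len_eq, PySem.Int.toList_toStr]; omega
      rw [hlen]
      simp [hb0]
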